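-- pv_equiv track=rewrite | github.com/aria-systems-group/Formal-Deep-Kernel-Synthesis | gp_parallel.py | extents_in_region
-- ===== SOURCE A (Python) =====
-- def extents_in_region(extents, region):
--     # returns a list of indices of extents that are inside the region
--     keys = list(extents[0])
--     valid = []
--     for extent_idx, extent in enumerate(extents):
--         in_region = True
--         for idx, k in enumerate(keys):
--             if extent[k][0] < region[idx][0] or extent[k][1] > region[idx][1]:
--                 # not in this dimension of the region
--                 in_region = False
--                 break
--         if in_region:
--             valid.append(extent_idx)
--
--     return valid
-- ===== SOURCE B (Python) =====
-- def extents_in_region(extents, region):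
--     # returns a list of indices of extents that are inside the region
--     # dimension-major sweep: refine a boolean mask over extents one dimension at a time
--     keys = list(extents[0])
--     mask = [True] * len(extents)
--     for idx, k in enumerate(keys):
--         lo, hi = region[idx][0], region[idx][1]
--         mask = [m and lo <= e[k][0] and e[k][1] <= hi for m, e in zip(mask, extents)]
--     return [i for i, m in enumerate(mask) if m]
-- ===== Notes on version B (the rewrite author's own statement) =====
-- stated objective: alternative
-- what changed: A scans extent-major with a per-extent inner dimension loop and early break; B sweeps dimension-major, refining a boolean mask over all extents one dimension at a time, then emits the indices where the mask is true.
-- outside the precondition, e.g. on extents_in_region([{'a': [5, 6], 'b': [0, 1]}], [[0, 1]]): A returns [], B raises IndexError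
import Mathlib
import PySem

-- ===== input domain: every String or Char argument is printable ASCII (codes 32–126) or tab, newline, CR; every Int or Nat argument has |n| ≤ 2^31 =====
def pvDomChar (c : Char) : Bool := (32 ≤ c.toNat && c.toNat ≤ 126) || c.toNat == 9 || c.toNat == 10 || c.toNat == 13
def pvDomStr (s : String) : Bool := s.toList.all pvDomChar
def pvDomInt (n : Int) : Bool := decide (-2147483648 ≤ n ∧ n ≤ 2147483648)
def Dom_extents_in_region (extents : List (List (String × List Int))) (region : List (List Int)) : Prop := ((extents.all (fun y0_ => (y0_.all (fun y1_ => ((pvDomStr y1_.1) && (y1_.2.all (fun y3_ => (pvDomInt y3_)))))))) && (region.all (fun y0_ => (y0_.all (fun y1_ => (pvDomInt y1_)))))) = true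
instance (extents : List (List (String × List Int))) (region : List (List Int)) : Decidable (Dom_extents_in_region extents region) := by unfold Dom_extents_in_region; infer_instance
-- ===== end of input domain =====

-- B replaces A's extent-major scan (inner dimension loop with early break) by a dimension-major
-- sweep refining a boolean mask over all extents, then emits indices where the mask is true
-- (objective: alternative).

-- first-match association-list lookup = Python dict access d[k] (none = KeyError); exact
def pvLookup (d : List (String × List Int)) (k : String) : Option (List Int) :=
  match d with
  | [] => none
  | (k', v) :: rest => if k' == k then some v else pvLookup rest k

-- ===== PORT A =====
-- one step of A's inner loop: True = the 'if' fired (dimension test failed -> break).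
-- On an input where Python raises (missing key / short list) the port answers True; Pre_ excludes those inputs.
def pvDimFail (extent : List (String × List Int)) (region : List (List Int)) (idx : Int) (k : String) : Bool :=
  match pvLookup extent k with
  | none => true
  | some v =>
    match PySem.List.pyGet? v 0 with
    | none => true
    | some v0 =>
      match PySem.List.pyGet? region idx with
      | none => true
      | some r =>
        match PySem.List.pyGet? r 0 with
        | none => true
        | some r0 =>
          if v0 < r0 then true
          else
            match PySem.List.pyGet? v 1, PySem.List.pyGet? r 1 with
            | some v1, some r1 => v1 > r1
            | _, _ => true

-- A's inner 'for idx, k in enumerate(keys)' with break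
def pvInRegionA (extent : List (String × List Int)) (region : List (List Int)) :
    List (Int × String) → Bool
  | [] => true
  | (idx, k) :: rest =>
    if pvDimFail extent region idx k then false else pvInRegionA extent region rest

def extents_in_region (extents : List (List (String × List Int))) (region : List (List Int)) : List Int :=
  match extents with
  | [] => []  -- Python raises IndexError on extents[0]; excluded by Pre_
  | first :: rest =>
    let xs := first :: rest
    let keys := first.map Prod.fst
    (PySem.List.enumerate xs).foldl
      (fun valid ie => if pvInRegionA ie.2 region (PySem.List.enumerate keys) then valid ++ [ie.1] else valid)
      []

-- ===== PORT B =====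
-- the mask-refinement condition 'lo <= e[k][0] and e[k][1] <= hi' for dimension (idx, k);
-- false where Python would raise (excluded by Pre_)
def pvDimOk (region : List (List Int)) (idx : Int) (k : String) (e : List (String × List Int)) : Bool :=
  ((PySem.List.pyGet? region idx).bind fun r =>
   (PySem.List.pyGet? r 0).bind fun lo =>
   (PySem.List.pyGet? r 1).bind fun hi =>
   (pvLookup e k).bind fun v =>
   (PySem.List.pyGet? v 0).bind fun a =>
   (PySem.List.pyGet? v 1).map fun b =>
   (decide (lo ≤ a) && decide (b ≤ hi))).getD false

def extents_in_region_alt (extents : List (List (String × List Int))) (region : List (List Int)) : List Int :=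
  match extents with
  | [] => []  -- Python raises IndexError on extents[0]; excluded by Pre_
  | first :: rest =>
    let xs := first :: rest
    let keys := first.map Prod.fst
    let mask := (PySem.List.enumerate keys).foldl
      (fun m p => (m.zip xs).map fun q => q.1 && pvDimOk region p.1 p.2 q.2)
      (List.replicate xs.length true)
    (PySem.List.enumerate mask).filterMap fun p => if p.2 then some p.1 else none

-- ===== PRECONDITION & SPEC =====
-- Pre_ excludes inputs where Python A or Python B raises (empty extents; a malformed region row or
-- missing key / short interval at a dimension some extent actually reaches, i.e. whose earlier
-- dimensions it passes; a region shorter than the key list, which A never notices when every extent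
-- fails early but B's dimension sweep always reads) and, as a dict-shape condition, extents whose
-- association lists carry duplicate keys (a Python dict cannot); see cites for corners where A
-- still returns.
-- duplicate-free key list, as a plain Boolean scan (dict shape)
def pvNodupKeys (ks : List String) : Bool :=
  match ks with
  | [] => true
  | k :: t => !t.contains k && pvNodupKeys t

-- key k present in extent e with an interval of length >= 2 (so e[k][0], e[k][1] are safe)
def pvWfE (e : List (String × List Int)) (k : String) : Bool :=
  match pvLookup e k with
  | none => false
  | some v => decide (2 ≤ v.length)

-- the accesses a reached dimension (j, k) actually performs are safe: e[k][1] is only read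
-- when e[k][0] does not already fail the lower bound (both programs short-circuit there)
def pvWfAtE (region : List (List Int)) (j : Nat) (e : List (String × List Int)) (k : String) : Bool :=
  match pvLookup e k with
  | none => false
  | some v => decide (2 ≤ v.length)
      || (decide (1 ≤ v.length) && decide (v[0]! < (region[j]!)[0]!))

-- extent e is well-formed at dimension (j, k) and passes its bounds test
def pvPassE (region : List (List Int)) (j : Nat) (e : List (String × List Int)) (k : String) : Bool :=
  pvWfE e k
  && decide ((region[j]!)[0]! ≤ ((pvLookup e k).getD [])[0]!)
  && decide (((pvLookup e k).getD [])[1]! ≤ (region[j]!)[1]!)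

def Pre_extents_in_region (extents : List (List (String × List Int))) (region : List (List Int)) : Prop :=
  (match extents with
   | [] => false
   | first :: _ =>
     let keys := first.map Prod.fst
     (List.range keys.length).all (fun j =>
        match region[j]? with
        | some r => decide (2 ≤ r.length)
        | none => false)
     && extents.all (fun e =>
          pvNodupKeys (e.map Prod.fst)
          && (List.range keys.length).all (fun j =>
               !decide (∀ i : Nat, i < j → pvPassE region i e (keys[i]!) = true)
               || pvWfAtE region j e (keys[j]!)))) = true

instance (extents : List (List (String × List Int))) (region : List (List Int)) : Decidable (Pre_extents_in_region extents region) := by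
  unfold Pre_extents_in_region; infer_instance

def pvWitness_extents_in_region : (List (List (String × List Int))) × List (List Int) :=
  ([[("a", [0, 1]), ("b", [2, 3])], [("a", [-1, 5]), ("b", [0, 9])]], [[0, 1], [0, 4]])

def Spec_extents_in_region (extents : List (List (String × List Int))) (region : List (List Int)) (out : List Int) : Prop := out = extents_in_region_alt extents region
instance (extents : List (List (String × List Int))) (region : List (List Int)) (out : List Int) : Decidable (Spec_extents_in_region extents region out) := by unfold Spec_extents_in_region; infer_instance

-- ===== CLAIM (what is proved, stated in full; the proofs are below) =====
def Claim_equal_extents_in_region : Prop := ∀ (extents : List (List (String × List Int))) (region : List (List Int)), Dom_extents_in_region extents region → Pre_extents_in_region extents region → Spec_extents_in_region extents region (extents_in_region extents region)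

-- ===== LEMMAS AND PROOFS =====

-- A's inner loop is an all-of over the dimension list
theorem pvInRegionA_eq_all (extent : List (String × List Int)) (region : List (List Int))
    (pairs : List (Int × String)) :
    pvInRegionA extent region pairs = pairs.all (fun p => !pvDimFail extent region p.1 p.2) := by
  induction pairs with
  | nil => rfl
  | cons p rest ih =>
    obtain ⟨idx, k⟩ := p
    show (if pvDimFail extent region idx k then false else pvInRegionA extent region rest) = _
    rw [List.all_cons, ih]
    cases pvDimFail extent region idx k <;> simp

-- B's per-dimension mask test is the negation of A's dimension test (unconditionally)
theorem pvDimOk_eq_not_fail (region : List (List Int)) (idx : Int) (k : String)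
    (e : List (String × List Int)) :
    pvDimOk region idx k e = !pvDimFail e region idx k := by
  unfold pvDimOk pvDimFail
  rcases pvLookup e k with _ | v <;> rcases PySem.List.pyGet? region idx with _ | r
  · rfl
  · simp only [Option.bind_some]
    rcases PySem.List.pyGet? r 0 with _ | r0
    · rfl
    · rcases PySem.List.pyGet? r 1 with _ | r1 <;> rfl
  · rcases h0 : PySem.List.pyGet? v 0 with _ | v0 <;> simp [h0]
  · simp only [Option.bind_some]
    rcases PySem.List.pyGet? r 0 with _ | r0
    · rcases PySem.List.pyGet? v 0 with _ | v0 <;> rfl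
    · simp only [Option.bind_some]
      rcases PySem.List.pyGet? r 1 with _ | r1
      · rcases PySem.List.pyGet? v 0 with _ | v0
        · rfl
        · rcases PySem.List.pyGet? v 1 with _ | v1 <;> by_cases h : v0 < r0 <;> simp [h]
      · simp only [Option.bind_some]
        rcases PySem.List.pyGet? v 0 with _ | v0
        · rfl
        · simp only [Option.bind_some]
          rcases PySem.List.pyGet? v 1 with _ | v1
          · by_cases h : v0 < r0 <;> simp [h]
          · by_cases h : v0 < r0
            · simp [h, not_le.mpr h]
            · by_cases h2 : r1 < v1 <;> simp [h, h2, not_le.mpr, not_lt.mp, *]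

-- the mask fold computes, pointwise, the conjunction of all per-dimension tests
theorem mask_fold_eq (xs : List (List (String × List Int))) (region : List (List Int)) :
    ∀ (pairs : List (Int × String)) (m : List Bool), m.length = xs.length →
    pairs.foldl (fun m p => (m.zip xs).map fun q => q.1 && pvDimOk region p.1 p.2 q.2) m
      = (m.zip xs).map fun q => q.1 && pairs.all (fun p => pvDimOk region p.1 p.2 q.2) := by
  intro pairs
  induction pairs with
  | nil =>
    intro m hm
    simp only [List.foldl_nil, List.all_nil, Bool.and_true]
    exact (List.map_fst_zip (le_of_eq hm)).symm
  | cons p rest ih =>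
    intro m hm
    simp only [List.foldl_cons]
    rw [ih _ (by simp [hm])]
    apply List.ext_getElem
    · simp [hm]
    · intro i h1 h2
      simp only [List.getElem_map, List.getElem_zip]
      have hx : i < xs.length := by simp [hm] at h1; omega
      simp [List.all_cons, Bool.and_assoc]

-- the initial all-true mask zipped with xs collapses to a plain map over xs
theorem mask_init_eq (xs : List (List (String × List Int))) (P : List (String × List Int) → Bool) :
    (((List.replicate xs.length true).zip xs).map fun q => q.1 && P q.2) = xs.map P := by
  apply List.ext_getElem
  · simp
  · intro i h1 h2
    simp [List.getElem_zip, List.getElem_replicate]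

-- enumerate of a mapped list
theorem enumerate_map {α β : Type} (f : α → β) (xs : List α) :
    ∀ (s : Int), PySem.List.enumerate (xs.map f) s
      = (PySem.List.enumerate xs s).map fun p => (p.1, f p.2) := by
  induction xs with
  | nil => intro s; simp [PySem.List.enumerate_nil]
  | cons x t ih =>
    intro s
    simp [PySem.List.enumerate_cons, ih]

-- filter-then-project equals filterMap
theorem filter_map_eq_filterMap {α β : Type} (c : α → Bool) (f : α → β) (l : List α) :
    (l.filter c).map f = l.filterMap fun a => if c a then some (f a) else none := by
  induction l with
  | nil => rfl
  | cons x t ih => cases h : c x <;> simp [h, ih]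

theorem extents_in_region_eq_alt (extents : List (List (String × List Int))) (region : List (List Int)) :
    extents_in_region extents region = extents_in_region_alt extents region := by
  cases extents with
  | nil => rfl
  | cons first rest =>
    unfold extents_in_region extents_in_region_alt
    simp only []
    set xs : List (List (String × List Int)) := first :: rest with hxs
    set pairs := PySem.List.enumerate (first.map Prod.fst) with hpairs
    -- A side: loop-with-append = filter then project
    rw [PySem.List.foldl_append_if
          (fun ie : Int × List (String × List Int) => pvInRegionA ie.2 region pairs)
          (fun ie : Int × List (String × List Int) => ie.1),
        List.nil_append,
        filter_map_eq_filterMap]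
    -- B side: mask fold = map of the conjunction test, then enumerate/filterMap over it
    rw [mask_fold_eq xs region pairs (List.replicate xs.length true) (by simp),
        mask_init_eq xs (fun e => pairs.all fun p => pvDimOk region p.1 p.2 e),
        enumerate_map, List.filterMap_map]
    apply List.filterMap_congr
    intro p _
    simp only [Function.comp, pvInRegionA_eq_all, pvDimOk_eq_not_fail]

-- ===== VERDICT (by name: the statement is the Claim_ definition above) =====
theorem extents_in_region_spec : Claim_equal_extents_in_region := by
  intro extents region _ _
  unfold Spec_extents_in_region
  exact extents_in_region_eq_alt extents region
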